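-- pv_equiv track=rewrite | github.com/michaelcrichlow/2024_11_23---isHex | test_03.py | isHex
-- ===== SOURCE A (Python) =====
-- def isHex(s: str) -> bool:
--     # guard clauses -------------------
--     if len(s) == 0 or len(s) == 1:
--         return False
--
--     if s.startswith("0x") == False:
--         return False
--     # ---------------------------------
--
--     test = "0123456789abcdefABCDEF"
--
--     for val in s[2:]:
--         if val not in test:
--             return False
--
--     return True
-- ===== SOURCE B (Python) =====
-- def isHex(s: str) -> bool:
--     # One-pass DFA: 0 = expect '0', 1 = expect 'x', 2 = hex digits, 3 = dead.
--     HEX = set("0123456789abcdefABCDEF")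
--     state = 0
--     for c in s:
--         if state == 0:
--             state = 1 if c == '0' else 3
--         elif state == 1:
--             state = 2 if c == 'x' else 3
--         elif state == 2:
--             state = 2 if c in HEX else 3
--         else:
--             break
--     return state == 2
-- ===== Notes on version B (the rewrite author's own statement) =====
-- stated objective: alternative
-- what changed: Replaced the guard clauses (length checks, startswith, slice) plus per-character loop with a single left-to-right 4-state DFA over the whole string, accepting iff the final state is the hex-digit state.
import Mathlib
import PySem

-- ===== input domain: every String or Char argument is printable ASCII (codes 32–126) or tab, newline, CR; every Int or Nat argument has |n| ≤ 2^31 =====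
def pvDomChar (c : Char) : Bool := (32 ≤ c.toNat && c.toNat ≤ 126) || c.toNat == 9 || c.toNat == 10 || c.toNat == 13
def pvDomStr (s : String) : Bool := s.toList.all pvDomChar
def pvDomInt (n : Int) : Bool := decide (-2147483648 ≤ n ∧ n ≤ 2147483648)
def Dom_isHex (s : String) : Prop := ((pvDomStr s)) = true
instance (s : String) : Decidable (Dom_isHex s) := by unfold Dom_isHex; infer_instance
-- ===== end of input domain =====

-- B replaces A's guard clauses + slice + loop by a single one-pass 4-state DFA; same cost, different structure.

-- ===== PORT A =====
-- for val in s[2:]: if val not in test: return False / return True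
-- ('val in test' with val a single char is substring membership of a length-1 string = char membership in test's chars; exact here)
def isHexLoopA : List Char → Bool
  | [] => true
  | v :: rest =>
    if PySem.Chars.isIn [v] "0123456789abcdefABCDEF".toList = false then false
    else isHexLoopA rest

def isHex (s : String) : Bool :=
  if PySem.Str.len s = 0 ∨ PySem.Str.len s = 1 then false
  else if PySem.Str.startswith s "0x" = false then false
  else isHexLoopA (PySem.Str.slice s (some 2) none).toList

-- ===== PORT B =====
-- DFA states: 0 expect '0', 1 expect 'x', 2 hex digits (accepting), 3 dead (break)
def hexClass : List Char := "0123456789abcdefABCDEF".toList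

def dfaRun : Nat → List Char → Nat
  | 0, c :: cs => dfaRun (if c = '0' then 1 else 3) cs
  | 1, c :: cs => dfaRun (if c = 'x' then 2 else 3) cs
  | 2, c :: cs => dfaRun (if hexClass.contains c then 2 else 3) cs
  | st, _ => st

def isHex_alt (s : String) : Bool := dfaRun 0 s.toList == 2

-- ===== PRECONDITION & SPEC =====
def Spec_isHex (s : String) (out : Bool) : Prop := out = isHex_alt s
instance (s : String) (out : Bool) : Decidable (Spec_isHex s out) := by unfold Spec_isHex; infer_instance

-- ===== CLAIM (what is proved, stated in full; the proofs are below) =====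
def Claim_equal_isHex : Prop := ∀ (s : String), Dom_isHex s → Spec_isHex s (isHex s)

-- ===== LEMMAS AND PROOFS =====

theorem dfaRun_dead (cs : List Char) : dfaRun 3 cs = 3 := by
  cases cs <;> rfl

theorem isIn_singleton (v : Char) (l : List Char) :
    PySem.Chars.isIn [v] l = l.contains v := by
  by_cases h : v ∈ l
  · have h1 : l.contains v = true := by simpa using h
    rw [h1, PySem.Chars.isIn_iff_infix]
    obtain ⟨s1, t1, rfl⟩ := List.append_of_mem h
    exact ⟨s1, t1, by simp⟩
  · have h2 : l.contains v = false := by simpa using h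
    rw [h2, PySem.Chars.isIn_eq_false_iff]
    intro hinf
    exact h (hinf.subset (List.mem_singleton_self v))

theorem loopA_eq_dfa2 (cs : List Char) : isHexLoopA cs = (dfaRun 2 cs == 2) := by
  induction cs with
  | nil => rfl
  | cons v rest ih =>
    rw [show isHexLoopA (v :: rest)
          = (if PySem.Chars.isIn [v] hexClass = false then false else isHexLoopA rest) from rfl,
        isIn_singleton,
        show dfaRun 2 (v :: rest) = dfaRun (if hexClass.contains v then 2 else 3) rest from rfl]
    cases h : hexClass.contains v
    · simp [dfaRun_dead]
    · simpa using ih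

-- ===== VERDICT (by name: the statement is the Claim_ definition above) =====
theorem isHex_spec : Claim_equal_isHex := by
  intro s _
  unfold Spec_isHex isHex isHex_alt
  have hs : s = String.ofList s.toList := by simp
  rw [hs]
  generalize s.toList = cs
  match cs with
  | [] => rfl
  | [c] => by_cases hc : c = '0' <;> simp [dfaRun, hc]
  | c1 :: c2 :: rest =>
    simp only [PySem.Str.len_eq, PySem.Str.startswith_eq, PySem.Str.slice,
      String.toList_ofList]
    by_cases h1 : c1 = '0'
    · subst h1
      by_cases h2 : c2 = 'x'
      · subst h2
        have hsl : PySem.List.slice ('0'::'x'::rest) (some 2) none = rest := by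
          simp [pysem]
        simp [hsl, dfaRun, PySem.Chars.startswith, loopA_eq_dfa2]
        omega
      · have hpre : ('x' == c2) = false := beq_eq_false_iff_ne.mpr (fun e => h2 e.symm)
        rw [show dfaRun 0 ('0' :: c2 :: rest) = dfaRun (if c2 = 'x' then 2 else 3) rest from by
            simp [dfaRun],
          if_neg h2, dfaRun_dead]
        simp [PySem.Chars.startswith, List.isPrefixOf, hpre]
    · have hpre : ('0' == c1) = false := beq_eq_false_iff_ne.mpr (fun e => h1 e.symm)
      rw [show dfaRun 0 (c1 :: c2 :: rest) = dfaRun (if c1 = '0' then 1 else 3) (c2 :: rest) from rfl,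
        if_neg h1, dfaRun_dead]
      simp [PySem.Chars.startswith, List.isPrefixOf, hpre]
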